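-- pv_equiv track=rewrite | github.com/bbriano/mit6.01 | lec2.py | find_sequence_rec
-- ===== SOURCE A (Python) =====
-- def find_sequence_rec(initial: int, goal: int) -> None:
--     if initial == goal:
--         return []
--     inc = ["inc", *find_sequence_rec(initial+1, goal)]
--     if initial > 1 and initial**2 <= goal:
--         sqr = ["sqr", *find_sequence_rec(initial**2, goal)]
--         if len(inc) < len(sqr):
--             return inc
--         else:
--             return sqr
--     return inc
-- ===== SOURCE B (Python) =====
-- def find_sequence_rec(initial: int, goal: int) -> None:
--     # Bottom-up DP on cost(v) = number of ops from v to goal. Only costs at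
--     # perfect squares are ever looked up again, so keep just those (sq) plus
--     # the running cost c of the previous value, then reconstruct the sequence.
--     s = 0
--     while (s + 1) * (s + 1) <= goal:
--         s += 1
--     sq = {}
--     if s * s == goal:
--         sq[goal] = 0
--         s -= 1
--     c = 0
--     for v in range(goal - 1, initial - 1, -1):
--         cand = c + 1
--         if v > 1 and v * v <= goal and sq[v * v] + 1 <= cand:
--             cand = sq[v * v] + 1
--         if v == s * s:
--             sq[v] = cand
--             s -= 1
--         c = cand
--     ops = []
--     v = initial
--     while v != goal:
--         if v > 1 and v * v <= goal and sq[v * v] + 1 == c: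
--             ops.append("sqr")
--             v = v * v
--         else:
--             ops.append("inc")
--             v = v + 1
--         c -= 1
--     return ops
-- ===== Notes on version B (the rewrite author's own statement) =====
-- stated objective: faster
-- what changed: Replaces the top-down recursion that rebuilds full candidate op-lists at every node (recomputing overlapping subproblems) with a bottom-up cost table over [initial, goal] followed by a single reconstruction walk.
import Mathlib
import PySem

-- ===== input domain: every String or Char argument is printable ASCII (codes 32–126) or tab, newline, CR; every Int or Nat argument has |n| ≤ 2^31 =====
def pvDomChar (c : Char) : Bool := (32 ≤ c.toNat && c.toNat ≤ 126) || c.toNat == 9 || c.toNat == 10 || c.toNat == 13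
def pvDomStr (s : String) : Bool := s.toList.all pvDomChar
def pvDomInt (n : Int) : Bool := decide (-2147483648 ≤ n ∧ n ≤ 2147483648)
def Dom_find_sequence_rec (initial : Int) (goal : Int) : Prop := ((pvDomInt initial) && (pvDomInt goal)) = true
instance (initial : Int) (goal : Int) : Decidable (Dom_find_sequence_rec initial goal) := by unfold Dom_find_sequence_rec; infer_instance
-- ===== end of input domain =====

-- B replaces A's top-down recursion (which recomputes overlapping subproblems) by a
-- bottom-up cost table plus one reconstruction walk: asymptotically faster.

-- ===== PORT A =====
-- A's recursion diverges when initial > goal (Python: RecursionError); fuel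
-- (goal - initial).toNat is exactly the recursion depth needed inside Pre_.
def pvGoA : Nat → Int → Int → List String
  | 0, _, _ => []
  | f+1, initial, goal =>
    if initial = goal then []
    else
      let inc := "inc" :: pvGoA f (initial + 1) goal
      if 1 < initial ∧ initial ^ 2 ≤ goal then
        let sqr := "sqr" :: pvGoA f (initial ^ 2) goal
        if inc.length < sqr.length then inc else sqr
      else inc

def find_sequence_rec (initial : Int) (goal : Int) : List String :=
  pvGoA (goal - initial).toNat initial goal

-- ===== PORT B =====
-- the isqrt while-loop; s rises by 1 each iteration, fuel goal.toNat suffices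
def pvIsqrt : Int → Nat → Int → Int
  | _, 0, s => s
  | goal, f+1, s => if (s + 1) * (s + 1) ≤ goal then pvIsqrt goal f (s + 1) else s

-- one step of B's downward for-loop; state = (sq dict, running cost c, next square root s)
def pvFillStep (goal : Int) (st : PySem.Dict Int Int × Int × Int) (v : Int) :
    PySem.Dict Int Int × Int × Int :=
  let cand := st.2.1 + 1
  let cand := if 1 < v ∧ v * v ≤ goal ∧ st.1.getD (v * v) 0 + 1 ≤ cand
              then st.1.getD (v * v) 0 + 1 else cand
  if v = st.2.2 * st.2.2 then (st.1.insert v cand, cand, st.2.2 - 1)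
  else (st.1, cand, st.2.2)

-- B's reconstruction while-loop; v advances toward goal, fuel (goal-initial).toNat suffices
def pvRecon : Nat → PySem.Dict Int Int → Int → Int → Int → List String
  | 0, _, _, _, _ => []
  | f+1, sq, v, c, goal =>
    if v = goal then []
    else if 1 < v ∧ v * v ≤ goal ∧ sq.getD (v * v) 0 + 1 = c then
      "sqr" :: pvRecon f sq (v * v) (c - 1) goal
    else
      "inc" :: pvRecon f sq (v + 1) (c - 1) goal

-- st is Source B's fill-loop result; named helper instead of a let-binding
def pvRun (initial goal : Int) (init : PySem.Dict Int Int × Int × Int) : List String :=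
  pvRecon (goal - initial).toNat
    ((PySem.List.pyRange (goal - 1) (initial - 1) (-1)).foldl (pvFillStep goal) init).1
    initial
    ((PySem.List.pyRange (goal - 1) (initial - 1) (-1)).foldl (pvFillStep goal) init).2.1
    goal

def find_sequence_rec_alt (initial : Int) (goal : Int) : List String :=
  pvRun initial goal
    (if pvIsqrt goal goal.toNat 0 * pvIsqrt goal goal.toNat 0 = goal
     then (PySem.Dict.empty.insert goal 0, 0, pvIsqrt goal goal.toNat 0 - 1)
     else (PySem.Dict.empty, 0, pvIsqrt goal goal.toNat 0))

-- ===== PRECONDITION & SPEC =====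
-- Pre_ excludes initial > goal, where Python A never returns (RecursionError).
def Pre_find_sequence_rec (initial : Int) (goal : Int) : Prop := initial ≤ goal
instance (initial : Int) (goal : Int) : Decidable (Pre_find_sequence_rec initial goal) := by
  unfold Pre_find_sequence_rec; infer_instance

def pvWitness_find_sequence_rec : Int × Int := (2, 9)

def Spec_find_sequence_rec (initial : Int) (goal : Int) (out : List String) : Prop :=
  out = find_sequence_rec_alt initial goal
instance (initial : Int) (goal : Int) (out : List String) :
    Decidable (Spec_find_sequence_rec initial goal out) := by
  unfold Spec_find_sequence_rec; infer_instance

-- ===== CLAIM (what is proved, stated in full; the proofs are below) =====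
def Claim_equal_find_sequence_rec : Prop :=
  ∀ (initial : Int) (goal : Int), Dom_find_sequence_rec initial goal →
    Pre_find_sequence_rec initial goal →
    Spec_find_sequence_rec initial goal (find_sequence_rec initial goal)

-- ===== LEMMAS AND PROOFS =====

-- any fuel ≥ the gap computes the same value as the canonical fuel
lemma pvGoA_canon (g : Int) : ∀ (f : Nat), ∀ v : Int, v ≤ g → (g - v).toNat ≤ f →
    pvGoA f v g = pvGoA (g - v).toNat v g := by
  intro f
  induction f using Nat.strong_induction_on with
  | _ f ih =>
    intro v hvg hf
    by_cases hveq : v = g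
    · subst hveq
      have h0 : (v - v).toNat = 0 := by omega
      rw [h0]
      cases f with
      | zero => rfl
      | succ f' => simp [pvGoA]
    · have hlt : v < g := lt_of_le_of_ne hvg hveq
      have hgap : 1 ≤ (g - v).toNat := by omega
      obtain ⟨k, hk⟩ : ∃ k, (g - v).toNat = k + 1 := ⟨(g - v).toNat - 1, by omega⟩
      obtain ⟨f', hf'⟩ : ∃ f', f = f' + 1 := ⟨f - 1, by omega⟩
      subst hf'
      rw [hk]
      simp only [pvGoA, if_neg hveq]
      have hinc1 : pvGoA f' (v + 1) g = pvGoA (g - (v + 1)).toNat (v + 1) g :=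
        ih f' (by omega) (v + 1) (by omega) (by omega)
      have hinc2 : pvGoA k (v + 1) g = pvGoA (g - (v + 1)).toNat (v + 1) g :=
        ih k (by omega) (v + 1) (by omega) (by omega)
      by_cases hc : 1 < v ∧ v ^ 2 ≤ g
      · have hsq : v + 2 ≤ v ^ 2 := by nlinarith [hc.1]
        have hsq1 : pvGoA f' (v ^ 2) g = pvGoA (g - v ^ 2).toNat (v ^ 2) g :=
          ih f' (by omega) (v ^ 2) hc.2 (by omega)
        have hsq2 : pvGoA k (v ^ 2) g = pvGoA (g - v ^ 2).toNat (v ^ 2) g :=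
          ih k (by omega) (v ^ 2) hc.2 (by omega)
        rw [if_pos hc, if_pos hc, hinc1, hinc2, hsq1, hsq2]
      · rw [if_neg hc, if_neg hc, hinc1, hinc2]

-- one-step unfolding of A in canonical (find_sequence_rec) form
lemma A_step (v g : Int) (hlt : v < g) :
    find_sequence_rec v g =
      if 1 < v ∧ v ^ 2 ≤ g then
        (if ("inc" :: find_sequence_rec (v + 1) g).length
            < ("sqr" :: find_sequence_rec (v ^ 2) g).length
         then "inc" :: find_sequence_rec (v + 1) g
         else "sqr" :: find_sequence_rec (v ^ 2) g)
      else "inc" :: find_sequence_rec (v + 1) g := by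
  unfold find_sequence_rec
  obtain ⟨k, hk⟩ : ∃ k, (g - v).toNat = k + 1 := ⟨(g - v).toNat - 1, by omega⟩
  rw [hk]
  simp only [pvGoA, if_neg (show ¬ v = g by omega)]
  have hinc : pvGoA k (v + 1) g = pvGoA (g - (v + 1)).toNat (v + 1) g :=
    pvGoA_canon g k (v + 1) (by omega) (by omega)
  by_cases hc : 1 < v ∧ v ^ 2 ≤ g
  · have hsq : v + 2 ≤ v ^ 2 := by nlinarith [hc.1]
    have hsqe : pvGoA k (v ^ 2) g = pvGoA (g - v ^ 2).toNat (v ^ 2) g :=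
      pvGoA_canon g k (v ^ 2) hc.2 (by omega)
    rw [if_pos hc, if_pos hc, hinc, hsqe]
  · rw [if_neg hc, if_neg hc, hinc]

-- B's cost function target: the length of A's result, as an Int
def pvCostA (v g : Int) : Int := ((find_sequence_rec v g).length : Int)

def pvIsSq (u : Int) : Prop := ∃ r : Int, 0 ≤ r ∧ u = r * r

-- the sq dict holds A's cost at every perfect square in (b, g]
def SqOK (b g : Int) (d : PySem.Dict Int Int) : Prop :=
  ∀ u : Int, b < u → u ≤ g → pvIsSq u → d.getD u 0 = pvCostA u g

-- invariant of the running square root s while v descends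
def SInv (v s : Int) : Prop := -1 ≤ s ∧ v < (s + 1) * (s + 1) ∧ (0 ≤ v → 0 ≤ s ∧ s * s ≤ v)

lemma pvIsqrt_spec (g : Int) : ∀ (f : Nat) (s : Int), 0 ≤ s → (g - s).toNat ≤ f →
    0 ≤ pvIsqrt g f s ∧ g < (pvIsqrt g f s + 1) * (pvIsqrt g f s + 1) ∧
      (s * s ≤ g → pvIsqrt g f s * pvIsqrt g f s ≤ g) := by
  intro f
  induction f with
  | zero =>
    intro s hs hf
    have hgs : g ≤ s := by omega
    simp only [pvIsqrt]
    exact ⟨hs, by nlinarith, fun h => by nlinarith⟩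
  | succ f ih =>
    intro s hs hf
    simp only [pvIsqrt]
    by_cases hc : (s + 1) * (s + 1) ≤ g
    · rw [if_pos hc]
      have hs1 : s + 1 ≤ (s + 1) * (s + 1) := by nlinarith
      have := ih (s + 1) (by omega) (by omega)
      exact ⟨this.1, this.2.1, fun _ => this.2.2 hc⟩
    · rw [if_neg hc]
      exact ⟨hs, by omega, fun h => h⟩

lemma sq_test_iff (v s : Int) (hinv : SInv v s) : v = s * s ↔ pvIsSq v := by
  obtain ⟨hs1, hs2, hs3⟩ := hinv
  constructor
  · intro h
    have hv0 : 0 ≤ v := by nlinarith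
    exact ⟨s, (hs3 hv0).1, h⟩
  · rintro ⟨r, hr, rfl⟩
    have hv0 : (0 : Int) ≤ r * r := by nlinarith
    obtain ⟨hs0, hss⟩ := hs3 hv0
    have : r = s := by nlinarith
    rw [this]

lemma fillStep_ok (g a : Int) (sqd : PySem.Dict Int Int) (c s : Int) (ha : a < g)
    (hsq : SqOK a g sqd) (hc : c = pvCostA (a + 1) g) (hinv : SInv a s) :
    SqOK (a - 1) g (pvFillStep g (sqd, c, s) a).1 ∧
      (pvFillStep g (sqd, c, s) a).2.1 = pvCostA a g ∧
      SInv (a - 1) (pvFillStep g (sqd, c, s) a).2.2 := by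
  have hA := A_step a g ha
  have hcand : (if 1 < a ∧ a * a ≤ g ∧ sqd.getD (a * a) 0 + 1 ≤ c + 1
      then sqd.getD (a * a) 0 + 1 else c + 1) = pvCostA a g := by
    by_cases hc1 : 1 < a ∧ a * a ≤ g
    · have hsqle : a + 2 ≤ a * a := by nlinarith [hc1.1]
      have hgd : sqd.getD (a * a) 0 = pvCostA (a * a) g :=
        hsq (a * a) (by omega) hc1.2 ⟨a, by omega, rfl⟩
      have hpow : a ^ 2 = a * a := sq a
      rw [hpow] at hA
      by_cases hc2 : sqd.getD (a * a) 0 + 1 ≤ c + 1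
      · rw [if_pos ⟨hc1.1, hc1.2, hc2⟩, hgd]
        unfold pvCostA
        rw [hA, if_pos ⟨hc1.1, hc1.2⟩,
          if_neg (show ¬ ("inc" :: find_sequence_rec (a + 1) g).length
              < ("sqr" :: find_sequence_rec (a * a) g).length by
            simp only [List.length_cons]
            rw [hgd, hc] at hc2; unfold pvCostA at hc2; omega)]
        simp only [List.length_cons]
        push_cast
        ring
      · rw [if_neg (by tauto), hc]
        unfold pvCostA
        rw [hA, if_pos ⟨hc1.1, hc1.2⟩,
          if_pos (show ("inc" :: find_sequence_rec (a + 1) g).length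
              < ("sqr" :: find_sequence_rec (a * a) g).length by
            simp only [List.length_cons]
            rw [hgd, hc] at hc2; unfold pvCostA at hc2; omega)]
        simp only [List.length_cons]
        push_cast
        ring
    · rw [if_neg (by tauto), hc]
      have hc1' : ¬ (1 < a ∧ a ^ 2 ≤ g) := by rw [sq]; exact hc1
      unfold pvCostA
      rw [hA, if_neg hc1']
      simp only [List.length_cons]
      push_cast
      ring
  have hstep : pvFillStep g (sqd, c, s) a =
      if a = s * s
      then (sqd.insert a (if 1 < a ∧ a * a ≤ g ∧ sqd.getD (a * a) 0 + 1 ≤ c + 1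
              then sqd.getD (a * a) 0 + 1 else c + 1),
            (if 1 < a ∧ a * a ≤ g ∧ sqd.getD (a * a) 0 + 1 ≤ c + 1
              then sqd.getD (a * a) 0 + 1 else c + 1), s - 1)
      else (sqd, (if 1 < a ∧ a * a ≤ g ∧ sqd.getD (a * a) 0 + 1 ≤ c + 1
              then sqd.getD (a * a) 0 + 1 else c + 1), s) := rfl
  rw [hstep]
  by_cases ht : a = s * s
  · rw [if_pos ht]
    have hv0 : 0 ≤ a := by nlinarith [hinv.1]
    obtain ⟨hs0, hss⟩ := hinv.2.2 hv0
    refine ⟨?_, hcand, ?_⟩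
    · intro u hu1 hu2 husq
      show (sqd.insert a _).getD u 0 = pvCostA u g
      rw [PySem.Dict.getD_insert]
      by_cases hua : u = a
      · rw [if_pos hua, hua, hcand]
      · rw [if_neg hua]
        exact hsq u (by omega) hu2 husq
    · show SInv (a - 1) (s - 1)
      refine ⟨by omega, by nlinarith [hinv.2.1], fun h0 => ?_⟩
      have h1 : 1 ≤ s * s := by omega
      have hs1 : 1 ≤ s := by nlinarith
      exact ⟨by omega, by nlinarith⟩
  · rw [if_neg ht]
    refine ⟨?_, hcand, ?_⟩
    · intro u hu1 hu2 husq
      by_cases hua : u = a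
      · exact absurd ((sq_test_iff a s hinv).mpr (hua ▸ husq)) ht
      · exact hsq u (by omega) hu2 husq
    · show SInv (a - 1) s
      refine ⟨hinv.1, by nlinarith [hinv.2.1], fun h0 => ?_⟩
      obtain ⟨hs0, hss⟩ := hinv.2.2 (by omega)
      have hne : s * s ≠ a := fun h => ht h.symm
      exact ⟨hs0, by omega⟩

lemma fill_fold_ok (g lo : Int) : ∀ (n : Nat) (a : Int) (sqd : PySem.Dict Int Int) (c s : Int),
    (a - lo + 1).toNat ≤ n → lo - 1 ≤ a → a < g → SqOK a g sqd → c = pvCostA (a + 1) g →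
    SInv a s →
    SqOK (lo - 1) g (((PySem.List.pyRange a (lo - 1) (-1)).foldl (pvFillStep g) (sqd, c, s)).1) ∧
    ((PySem.List.pyRange a (lo - 1) (-1)).foldl (pvFillStep g) (sqd, c, s)).2.1 = pvCostA lo g := by
  intro n
  induction n with
  | zero =>
    intro a sqd c s hn hlo ha hsq hc hinv
    have haeq : a = lo - 1 := by omega
    rw [PySem.List.pyRange_neg_one_eq_nil (by omega), List.foldl_nil]
    refine ⟨haeq ▸ hsq, ?_⟩
    show c = pvCostA lo g
    rw [hc, show a + 1 = lo from by omega]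
  | succ n ih =>
    intro a sqd c s hn hlo ha hsq hc hinv
    by_cases hend : a ≤ lo - 1
    · have haeq : a = lo - 1 := by omega
      rw [PySem.List.pyRange_neg_one_eq_nil (by omega), List.foldl_nil]
      refine ⟨haeq ▸ hsq, ?_⟩
      show c = pvCostA lo g
      rw [hc, show a + 1 = lo from by omega]
    · rw [PySem.List.pyRange_neg_one_cons (by omega), List.foldl_cons]
      obtain ⟨h1, h2, h3⟩ := fillStep_ok g a sqd c s ha hsq hc hinv
      have hst : pvFillStep g (sqd, c, s) a =
          ((pvFillStep g (sqd, c, s) a).1, (pvFillStep g (sqd, c, s) a).2.1,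
            (pvFillStep g (sqd, c, s) a).2.2) := rfl
      rw [hst]
      exact ih (a - 1) _ _ _ (by omega) (by omega) (by omega) h1
        (by rw [show a - 1 + 1 = a from by omega]; exact h2) h3

lemma recon_eq (initial g : Int) (sqd : PySem.Dict Int Int) (hok : SqOK (initial - 1) g sqd) :
    ∀ (f : Nat) (v c : Int), initial ≤ v → v ≤ g → c = pvCostA v g → (g - v).toNat ≤ f →
    pvRecon f sqd v c g = find_sequence_rec v g := by
  intro f
  induction f with
  | zero =>
    intro v c hv1 hv2 hc hf
    have hv : v = g := by omega
    subst hv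
    unfold find_sequence_rec
    rw [show (v - v).toNat = 0 by omega]
    rfl
  | succ f ih =>
    intro v c hv1 hv2 hc hf
    by_cases hveq : v = g
    · subst hveq
      simp only [pvRecon]
      unfold find_sequence_rec
      rw [show (v - v).toNat = 0 by omega]
      simp [pvGoA]
    · have hlt : v < g := lt_of_le_of_ne hv2 hveq
      simp only [pvRecon, if_neg hveq]
      have hA := A_step v g hlt
      by_cases hc1 : 1 < v ∧ v * v ≤ g
      · have hsqle : v + 2 ≤ v * v := by nlinarith [hc1.1]
        have hgd : sqd.getD (v * v) 0 = pvCostA (v * v) g :=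
          hok (v * v) (by omega) hc1.2 ⟨v, by omega, rfl⟩
        have hpow : v ^ 2 = v * v := sq v
        rw [hpow] at hA
        have hfuel : (g - v * v).toNat ≤ f := by omega
        by_cases hinner : ("inc" :: find_sequence_rec (v + 1) g).length
            < ("sqr" :: find_sequence_rec (v * v) g).length
        · -- A picks inc; recon's sqr condition must be false
          have hlen : pvCostA v g = 1 + pvCostA (v + 1) g := by
            unfold pvCostA
            rw [hA, if_pos ⟨hc1.1, hc1.2⟩, if_pos hinner]
            simp only [List.length_cons]
            push_cast
            ring
          have hne : ¬ (1 < v ∧ v * v ≤ g ∧ sqd.getD (v * v) 0 + 1 = c) := by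
            rintro ⟨-, -, heq⟩
            rw [hgd, hc, hlen] at heq
            simp only [List.length_cons] at hinner
            unfold pvCostA at heq
            omega
          rw [if_neg hne, hA, if_pos ⟨hc1.1, hc1.2⟩, if_pos hinner]
          congr 1
          exact ih (v + 1) (c - 1) (by omega) (by omega) (by rw [hc, hlen]; ring) (by omega)
        · -- A picks sqr; recon's sqr condition must be true
          have hlen : pvCostA v g = 1 + pvCostA (v * v) g := by
            unfold pvCostA
            rw [hA, if_pos ⟨hc1.1, hc1.2⟩, if_neg hinner]
            simp only [List.length_cons]
            push_cast
            ring
          have heq : sqd.getD (v * v) 0 + 1 = c := by rw [hgd, hc, hlen]; ring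
          rw [if_pos ⟨hc1.1, hc1.2, heq⟩, hA, if_pos ⟨hc1.1, hc1.2⟩, if_neg hinner]
          congr 1
          exact ih (v * v) (c - 1) (by omega) hc1.2 (by rw [hc, hlen]; ring) hfuel
      · have hc1' : ¬ (1 < v ∧ v ^ 2 ≤ g) := by rw [sq]; exact hc1
        have hlen : pvCostA v g = 1 + pvCostA (v + 1) g := by
          unfold pvCostA
          rw [hA, if_neg hc1']
          simp only [List.length_cons]
          push_cast
          ring
        rw [if_neg (by tauto), hA, if_neg hc1']
        congr 1
        exact ih (v + 1) (c - 1) (by omega) (by omega) (by rw [hc, hlen]; ring) (by omega)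

lemma pvRun_eq (initial goal : Int) (hpre : initial ≤ goal)
    (sqd : PySem.Dict Int Int) (c s : Int)
    (hsq : SqOK (goal - 1) goal sqd) (hc : c = pvCostA goal goal)
    (hinv : SInv (goal - 1) s) :
    pvRun initial goal (sqd, c, s) = find_sequence_rec initial goal := by
  have hAg : find_sequence_rec goal goal = [] := by
    unfold find_sequence_rec
    rw [show (goal - goal).toNat = 0 by omega]
    rfl
  unfold pvRun
  by_cases hgi : initial = goal
  · subst hgi
    rw [PySem.List.pyRange_neg_one_eq_nil (by omega), List.foldl_nil,
      show (initial - initial).toNat = 0 by omega, hAg]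
    rfl
  · have hlt : initial < goal := lt_of_le_of_ne hpre hgi
    obtain ⟨hfold1, hfold2⟩ := fill_fold_ok goal initial ((goal - 1 - initial + 1).toNat)
      (goal - 1) sqd c s le_rfl (by omega) (by omega) hsq
      (by rw [hc]; congr 1; omega) hinv
    exact recon_eq initial goal _ hfold1 ((goal - initial).toNat) initial _ le_rfl
      (by omega) hfold2 le_rfl

-- ===== VERDICT (by name: the statement is the Claim_ definition above) =====
theorem find_sequence_rec_spec : Claim_equal_find_sequence_rec := by
  intro initial goal _ hpre
  unfold Spec_find_sequence_rec find_sequence_rec_alt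
  have hcost0 : pvCostA goal goal = 0 := by
    unfold pvCostA find_sequence_rec
    rw [show (goal - goal).toNat = 0 by omega]
    rfl
  obtain ⟨hs0nn, hs0ub, hs0lb⟩ := pvIsqrt_spec goal goal.toNat 0 le_rfl (by omega)
  by_cases hsq0 : pvIsqrt goal goal.toNat 0 * pvIsqrt goal goal.toNat 0 = goal
  · rw [if_pos hsq0]
    refine (pvRun_eq initial goal hpre _ _ _ ?_ hcost0.symm ?_).symm
    · intro u hu1 hu2 husq
      rw [show u = goal by omega, PySem.Dict.getD_insert, if_pos rfl, hcost0]
    · refine ⟨by omega, by nlinarith, fun h0 => ?_⟩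
      have hg1 : 1 ≤ goal := by omega
      have hs1 : 1 ≤ pvIsqrt goal goal.toNat 0 := by nlinarith
      exact ⟨by omega, by nlinarith⟩
  · rw [if_neg hsq0]
    refine (pvRun_eq initial goal hpre _ _ _ ?_ hcost0.symm ?_).symm
    · intro u hu1 hu2 husq
      obtain ⟨r, hr, hrr⟩ := husq
      have hu : u = goal := by omega
      rw [hu] at hrr
      have hg0 : 0 ≤ goal := by nlinarith
      have hlb := hs0lb (by nlinarith)
      have hrs : r = pvIsqrt goal goal.toNat 0 := by nlinarith
      exact absurd (by rw [← hrs]; omega : pvIsqrt goal goal.toNat 0 * pvIsqrt goal goal.toNat 0 = goal) hsq0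
    · exact ⟨by omega, by nlinarith, fun h0 => ⟨hs0nn, by omega⟩⟩
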